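-- pv_equiv track=rewrite | github.com/shaxrizodaisoyeva/dictionary_beginner_homework | sum_age_value.py | sum_age_values
-- ===== SOURCE A (Python) =====
-- def sum_age_values(data:list) -> int:
--     """
--     Return the sum of all age values in a dictionary.
--     Args:
--         data (dict): A dictionary of values
--     Returns:
--         int: The sum of all age values in the dictionary
--     """
--     a=0
--     b=[]
--     c=[]
--     sum=0
--     while a<len(data):
--         b+=data[a].values()
--         a+=1
--     c=b[1::2]
--     for i in c:
--         sum+=i
--     return sum
-- ===== SOURCE B (Python) =====
-- def sum_age_values(data: list) -> int:
--     # streaming pass: global parity counter, no flattened list or slice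
--     idx = 0
--     total = 0
--     for d in data:
--         for v in d.values():
--             if idx % 2 == 1:
--                 total += v
--             idx += 1
--     return total
-- ===== Notes on version B (the rewrite author's own statement) =====
-- stated objective: simpler
-- what changed: Replaces A's three-list pipeline (flatten all dict values into a list, take the [1::2] slice, sum it in a second loop) with a single streaming pass that keeps a global position counter and adds a value to the running total only when its flattened index is odd, never materializing any intermediate list.
import Mathlib
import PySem

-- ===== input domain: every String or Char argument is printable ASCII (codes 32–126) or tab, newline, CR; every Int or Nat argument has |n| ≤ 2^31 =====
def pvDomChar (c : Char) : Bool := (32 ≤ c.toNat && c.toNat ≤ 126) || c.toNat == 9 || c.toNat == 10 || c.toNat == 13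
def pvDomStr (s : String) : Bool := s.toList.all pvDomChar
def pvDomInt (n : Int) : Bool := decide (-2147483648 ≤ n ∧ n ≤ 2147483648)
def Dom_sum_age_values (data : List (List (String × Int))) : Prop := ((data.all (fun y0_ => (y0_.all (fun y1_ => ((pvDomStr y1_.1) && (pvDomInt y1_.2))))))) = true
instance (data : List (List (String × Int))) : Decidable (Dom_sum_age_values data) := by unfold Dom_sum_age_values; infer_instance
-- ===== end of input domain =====

-- B replaces A's flatten-then-slice-then-sum (three intermediate lists) by one
-- streaming pass with a global parity counter; objective: simpler.

-- ===== PORT A =====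
def sum_age_values (data : List (List (String × Int))) : Int :=
  -- while a < len(data): b += data[a].values()  (the while loop walks data in order)
  let b : List Int := data.foldl (fun b d => b ++ (PySem.Dict.ofList d).values) []
  -- c = b[1::2]  (step 2 ≠ 0, so slice? is always `some`)
  let c : List Int := (PySem.List.slice? b (some 1) none 2).getD []
  c.foldl (fun s i => s + i) 0

-- ===== PORT B =====
def sum_age_values_alt (data : List (List (String × Int))) : Int :=
  let p : Int × Int := data.foldl
    (fun st d => (PySem.Dict.ofList d).values.foldl
      (fun (st : Int × Int) v => (st.1 + 1, if st.1 % 2 == 1 then st.2 + v else st.2)) st)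
    (0, 0)
  p.2

-- ===== PRECONDITION & SPEC =====
def Spec_sum_age_values (data : List (List (String × Int))) (out : Int) : Prop := out = sum_age_values_alt data
instance (data : List (List (String × Int))) (out : Int) : Decidable (Spec_sum_age_values data out) := by unfold Spec_sum_age_values; infer_instance

-- ===== CLAIM (what is proved, stated in full; the proofs are below) =====
def Claim_equal_sum_age_values : Prop := ∀ (data : List (List (String × Int))), Dom_sum_age_values data → Spec_sum_age_values data (sum_age_values data)

-- ===== LEMMAS AND PROOFS =====

/-- Elements at odd positions (what Python's `[1::2]` keeps). -/
def pvOdds : List Int → List Int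
  | [] => []
  | [_] => []
  | _ :: y :: r => y :: pvOdds r

mutual
/-- Sum of the elements at odd positions. -/
def pvOddSum : List Int → Int
  | [] => 0
  | _ :: r => pvEvenSum r
/-- Sum of the elements at even positions. -/
def pvEvenSum : List Int → Int
  | [] => 0
  | x :: r => x + pvOddSum r
end

lemma slice?_nil_one_two : PySem.List.slice? ([] : List Int) (some 1) none 2 = some [] := by
  simp [PySem.List.slice?, PySem.List.sliceIndices]

lemma slice?_single_one_two (x : Int) : PySem.List.slice? [x] (some 1) none 2 = some [] := by
  simp [PySem.List.slice?, PySem.List.sliceIndices]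

lemma slice?_cons_cons_one_two (x y : Int) (r : List Int) :
    PySem.List.slice? (x :: y :: r) (some 1) none 2 =
      (PySem.List.slice? r (some 1) none 2).map (y :: ·) := by
  rcases r with _ | ⟨z, r⟩
  · simp only [PySem.List.slice?, PySem.List.sliceIndices]
    norm_num [List.filterMap]
  · simp only [PySem.List.slice?, PySem.List.sliceIndices]
    norm_num
    have h1 : min (1:Int) ((r.length:Int) + 1 + 1 + 1) = 1 := by omega
    rw [h1]
    have h2 : (if (0:Int) ≤ (r.length:Int) + 1 then (((r.length:Int) + 1 + 1 + 1 - 1 + 2 - 1) / 2).toNat else 0)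
        = (((r.length:Int) + 2 - 1) / 2).toNat + 1 := by
      rw [if_pos (by omega : (0:Int) ≤ (r.length:Int) + 1)]; omega
    have h3 : (if 0 < r.length then (((r.length:Int) + 2 - 1) / 2).toNat else 0)
        = (((r.length:Int) + 2 - 1) / 2).toNat := by
      by_cases h : 0 < r.length
      · rw [if_pos h]
      · rw [if_neg h]; omega
    rw [h2, h3]
    rw [List.range_succ_eq_map, List.filterMap_cons, List.filterMap_map]
    norm_num
    apply List.filterMap_congr
    intro k hk
    have e1 : ((1:Int) + 2 * ((k:Int)+1)).toNat = 2*k+1+1+1 := by omega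
    have e2 : ((1:Int) + 2 * (k:Int)).toNat = 2*k+1 := by omega
    simp only [e1, e2, List.getElem?_cons_succ]

lemma slice?_one_two_eq_odds (xs : List Int) :
    PySem.List.slice? xs (some 1) none 2 = some (pvOdds xs) := by
  induction xs using pvOdds.induct with
  | case1 => exact slice?_nil_one_two
  | case2 x => exact slice?_single_one_two x
  | case3 x y r ih =>
      rw [pvOdds, slice?_cons_cons_one_two, ih, Option.map_some]

lemma sum_odds_eq_oddSum (l : List Int) : (pvOdds l).sum = pvOddSum l := by
  induction l using pvOdds.induct with
  | case1 => simp [pvOdds, pvOddSum]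
  | case2 x => simp [pvOdds, pvOddSum, pvEvenSum]
  | case3 x y r ih => simp [pvOdds, pvOddSum, pvEvenSum, ih]

lemma foldl_step_eq (l : List Int) (idx total : Int) :
    l.foldl (fun (st : Int × Int) v => (st.1 + 1, if st.1 % 2 == 1 then st.2 + v else st.2)) (idx, total)
      = (idx + l.length, total + (if idx % 2 == 1 then pvEvenSum l else pvOddSum l)) := by
  induction l generalizing idx total with
  | nil =>
      simp only [List.foldl_nil, pvOddSum, pvEvenSum, List.length_nil]
      by_cases h : idx % 2 = 1 <;> simp [h]
  | cons v r ih =>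
      simp only [List.foldl_cons, ih, List.length_cons]
      by_cases h : idx % 2 = 1
      · have h1 : (idx + 1) % 2 ≠ 1 := by omega
        simp only [beq_iff_eq, h, if_true, h1, if_false, pvOddSum, pvEvenSum]
        simp only [Prod.mk.injEq]
        exact ⟨by push_cast; ring, by ring⟩
      · have h1 : (idx + 1) % 2 = 1 := by omega
        simp only [beq_iff_eq, h, if_false, h1, if_true, pvOddSum, pvEvenSum]
        simp only [Prod.mk.injEq]
        exact ⟨by push_cast; ring, trivial⟩

-- ===== VERDICT (by name: the statement is the Claim_ definition above) =====
theorem sum_age_values_spec : Claim_equal_sum_age_values := by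
  intro data _
  unfold Spec_sum_age_values sum_age_values sum_age_values_alt
  simp only [PySem.List.foldl_append_eq_flatMap, List.nil_append,
    slice?_one_two_eq_odds, Option.getD_some, List.flatMap_def]
  have hB : List.foldl
        (fun (st : Int × Int) d => List.foldl
          (fun (st : Int × Int) v => (st.1 + 1, if st.1 % 2 == 1 then st.2 + v else st.2)) st
          (PySem.Dict.ofList d).values)
        ((0:Int), (0:Int)) data
      = List.foldl
          (fun (st : Int × Int) v => (st.1 + 1, if st.1 % 2 == 1 then st.2 + v else st.2))
          ((0:Int), (0:Int))
          ((data.map fun d => (PySem.Dict.ofList d).values).flatten) := by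
    rw [List.foldl_flatten, List.foldl_map]
  rw [hB, foldl_step_eq]
  have hA := PySem.List.foldl_add
    (pvOdds ((data.map fun d => (PySem.Dict.ofList d).values).flatten)) (fun i => i) 0
  simp only [hA, List.map_id', zero_add, sum_odds_eq_oddSum]
  norm_num
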